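-- pv_equiv track=rewrite | github.com/AdamZhouSE/pythonHomework | Code/CodeRecords/2929/60643/297792.py | solution
-- ===== SOURCE A (Python) =====
-- def solution(songs,m):
--     dif=sum(songs[i][0] for i in range(len(songs))) - m
--     minNum=sum(songs[i][1] for i in range(len(songs)))
--     if minNum>m:
--         return -1
--
--     minus=[x[0]-x[1] for x in songs]
--     minus=sorted(minus,reverse=True)
--     cnt=0
--     tol=0
--     for i in minus:
--         if tol<dif:
--             cnt+=1
--             tol+=i
--             continue
--         else:
--             break
--     return cnt
-- ===== SOURCE B (Python) =====
-- def solution(songs, m):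
--     # Selection loop: no sort; repeatedly extract the maximum remaining slack
--     # and count down the excess until it is covered or the list is exhausted.
--     if sum(x[1] for x in songs) > m:
--         return -1
--     dif = sum(x[0] for x in songs) - m
--     slacks = [x[0] - x[1] for x in songs]
--     cnt = 0
--     while dif > 0 and slacks:
--         best = max(slacks)
--         slacks.remove(best)
--         dif -= best
--         cnt += 1
--     return cnt
-- ===== Notes on version B (the rewrite author's own statement) =====
-- stated objective: alternative
-- what changed: B never sorts: after the -1 guard it runs a selection loop that repeatedly extracts the maximum remaining slack with max()/list.remove() and counts down the remaining excess dif until it is covered or the list is empty, instead of A's descending sort followed by an accumulate-until-break scan.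
import Mathlib
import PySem

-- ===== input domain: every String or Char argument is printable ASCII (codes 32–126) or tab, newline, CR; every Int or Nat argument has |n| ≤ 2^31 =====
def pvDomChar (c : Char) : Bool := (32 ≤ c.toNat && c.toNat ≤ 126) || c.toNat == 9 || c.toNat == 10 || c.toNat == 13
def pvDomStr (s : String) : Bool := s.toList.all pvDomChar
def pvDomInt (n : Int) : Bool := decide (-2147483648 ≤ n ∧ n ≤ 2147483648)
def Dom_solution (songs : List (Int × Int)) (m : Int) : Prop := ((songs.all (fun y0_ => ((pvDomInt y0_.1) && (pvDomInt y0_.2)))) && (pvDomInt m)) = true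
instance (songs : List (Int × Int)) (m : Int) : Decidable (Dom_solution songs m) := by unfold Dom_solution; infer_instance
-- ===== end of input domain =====

-- B replaces A's sort-then-scan by a sort-free selection loop (repeated max
-- extraction with remove), counting down the excess — an alternative algorithm.

-- ===== PORT A =====
-- the for-loop over the descending slacks: state (cnt, tol), break = return cnt
def solutionLoopA (minus : List Int) (dif : Int) (cnt : Int) (tol : Int) : Int :=
  match minus with
  | [] => cnt
  | i :: rest => if tol < dif then solutionLoopA rest dif (cnt + 1) (tol + i) else cnt

def solution (songs : List (Int × Int)) (m : Int) : Int :=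
  let dif := (songs.foldl (fun s x => s + x.1) 0) - m
  let minNum := songs.foldl (fun s x => s + x.2) 0
  if minNum > m then -1
  else
    let minus := songs.map (fun x => x.1 - x.2)
    let minus := PySem.List.sorted minus (fun x => x) true
    solutionLoopA minus dif 0 0

-- ===== PORT B =====
-- the while-loop 'while dif > 0 and slacks': each pass removes one element, so
-- fuel = initial length makes the same computation total (fuel is never short)
def solutionLoopB (fuel : Nat) (slacks : List Int) (dif : Int) (cnt : Int) : Int :=
  match fuel with
  | 0 => cnt
  | Nat.succ f =>
    if 0 < dif ∧ slacks ≠ [] then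
      match PySem.List.max? slacks (fun x => x) with
      | some best =>
        match PySem.List.remove? slacks best with
        | some rest => solutionLoopB f rest (dif - best) (cnt + 1)
        | none => cnt        -- unreachable: max(slacks) ∈ slacks
      | none => cnt          -- unreachable: slacks ≠ []
    else cnt

def solution_alt (songs : List (Int × Int)) (m : Int) : Int :=
  if songs.foldl (fun s x => s + x.2) 0 > m then -1
  else
    let dif := (songs.foldl (fun s x => s + x.1) 0) - m
    let slacks := songs.map (fun x => x.1 - x.2)
    solutionLoopB slacks.length slacks dif 0

-- ===== PRECONDITION & SPEC =====
def Spec_solution (songs : List (Int × Int)) (m : Int) (out : Int) : Prop := out = solution_alt songs m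
instance (songs : List (Int × Int)) (m : Int) (out : Int) : Decidable (Spec_solution songs m out) := by unfold Spec_solution; infer_instance

-- ===== CLAIM (what is proved, stated in full; the proofs are below) =====
def Claim_equal_solution : Prop := ∀ (songs : List (Int × Int)) (m : Int), Dom_solution songs m → Spec_solution songs m (solution songs m)

-- ===== LEMMAS AND PROOFS =====

-- A's loop with accumulator tol equals the loop with the excess shifted into dif
theorem loopA_shift (l : List Int) (dif cnt tol : Int) :
    solutionLoopA l dif cnt tol = solutionLoopA l (dif - tol) cnt 0 := by
  induction l generalizing dif cnt tol with
  | nil => rfl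
  | cons i rest ih =>
    simp only [solutionLoopA]
    have hc : (tol < dif) ↔ ((0 : Int) < dif - tol) := by omega
    by_cases h : tol < dif
    · rw [if_pos h, if_pos (hc.mp h), ih, ih (dif - tol), ]
      congr 1; omega
    · rw [if_neg h, if_neg (fun hh => h (hc.mpr hh))]

-- extracting the first maximum is peeling the head of the descending sort
theorem sortedDesc_cons_max (s : List Int) (v : Int)
    (h : PySem.List.max? s (fun x => x) = some v) :
    PySem.List.sorted s (fun x => x) true
      = v :: PySem.List.sorted (s.erase v) (fun x => x) true := by
  have hv : v ∈ s := PySem.List.max?_mem h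
  have hmax : ∀ y ∈ s, y ≤ v := fun y hy => PySem.List.max?_isMax h y hy
  have hperm : (PySem.List.sorted s (fun x => x) true).Perm
      (v :: PySem.List.sorted (s.erase v) (fun x => x) true) := by
    refine (PySem.List.sorted_perm s (fun x => x) true).trans ?_
    refine ((List.perm_cons_erase hv).trans ?_)
    exact List.Perm.cons v (PySem.List.sorted_perm _ _ _).symm
  have h1 : (PySem.List.sorted s (fun x => x) true).Pairwise (fun a b : Int => b ≤ a) :=
    PySem.List.sorted_pairwise_rev s (fun x => x)
  have h2 : (v :: PySem.List.sorted (s.erase v) (fun x => x) true).Pairwise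
      (fun a b : Int => b ≤ a) := by
    refine List.pairwise_cons.mpr ⟨?_, PySem.List.sorted_pairwise_rev _ _⟩
    intro b hb
    exact hmax b (List.mem_of_mem_erase ((PySem.List.mem_sorted _ _ _ _).mp hb))
  exact hperm.eq_of_pairwise (fun _ _ _ _ hab hba => le_antisymm hba hab) h1 h2

-- B's selection loop equals A's scan of the descending sort
theorem loopB_eq_loopA (fuel : Nat) (s : List Int) (hf : s.length ≤ fuel) (d cnt : Int) :
    solutionLoopB fuel s d cnt
      = solutionLoopA (PySem.List.sorted s (fun x => x) true) d cnt 0 := by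
  induction fuel generalizing s d cnt with
  | zero =>
    have : s = [] := List.length_eq_zero_iff.mp (Nat.le_zero.mp hf)
    subst this
    simp [solutionLoopB, PySem.List.sorted, solutionLoopA]
  | succ f ih =>
    by_cases h : 0 < d ∧ s ≠ []
    · obtain ⟨hd, hs⟩ := h
      obtain ⟨v, hv⟩ : ∃ v, PySem.List.max? s (fun x => x) = some v := by
        cases hm : PySem.List.max? s (fun x => x) with
        | none => exact absurd (((PySem.List.max?_eq_none_iff _ _).mp hm)) hs
        | some v => exact ⟨v, rfl⟩
      have hmem : v ∈ s := PySem.List.max?_mem hv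
      have hrem : PySem.List.remove? s v = some (s.erase v) :=
        PySem.List.remove?_eq_some_erase s v hmem
      have hlen : (s.erase v).length ≤ f := by
        have := List.length_erase_of_mem hmem
        have hpos : 0 < s.length := List.length_pos_iff.mpr hs
        omega
      simp only [solutionLoopB, if_pos (And.intro hd hs), hv, hrem]
      rw [ih _ hlen, sortedDesc_cons_max s v hv]
      simp only [solutionLoopA, if_pos (by omega : (0:Int) < d)]
      rw [loopA_shift _ d (cnt + 1) (0 + v)]
      norm_num
    · simp only [solutionLoopB, if_neg h]
      cases hsrt : PySem.List.sorted s (fun x => x) true with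
      | nil => rfl
      | cons x t =>
        have hs : s ≠ [] := by
          intro he; subst he
          simp [PySem.List.sorted] at hsrt
        have hd : ¬ (0 : Int) < d := fun hd => h ⟨hd, hs⟩
        simp [solutionLoopA, hd]

-- ===== VERDICT (by name: the statement is the Claim_ definition above) =====
theorem solution_spec : Claim_equal_solution := by
  intro songs m _
  show solution songs m = solution_alt songs m
  unfold solution solution_alt
  by_cases hmin : songs.foldl (fun s x => s + x.2) 0 > m
  · simp [hmin]
  · simp only [hmin, if_false]
    exact (loopB_eq_loopA _ _ (le_refl _) _ _).symm
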